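-- pv_equiv track=rewrite | github.com/ghostlobster/quant-platform | analysis/entropy_features.py | _lz_distinct_substring_count
-- ===== SOURCE A (Python) =====
-- def _lz_distinct_substring_count(s: str) -> int:
--     """Greedy Lempel-Ziv factorisation: count the distinct phrases."""
--     if not s:
--         return 0
--     dictionary: set[str] = set()
--     count = 0
--     buf = ""
--     for ch in s:
--         buf += ch
--         if buf not in dictionary:
--             dictionary.add(buf)
--             count += 1
--             buf = ""
--     if buf:
--         count += 1     # trailing partial phrase
--     return count
-- ===== SOURCE B (Python) =====
-- def _lz_distinct_substring_count(s: str) -> int: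
--     """Greedy Lempel-Ziv factorisation: count the distinct phrases (trie walk)."""
--     trie: dict[tuple[int, str], int] = {}
--     cur = 0        # current trie node (0 = root)
--     nxt = 1        # next fresh node id
--     count = 0
--     for ch in s:
--         key = (cur, ch)
--         nid = trie.get(key)
--         if nid is not None:
--             cur = nid
--         else:
--             trie[key] = nxt
--             nxt += 1
--             count += 1
--             cur = 0
--     if cur != 0:
--         count += 1     # trailing partial phrase
--     return count
-- ===== Notes on version B (the rewrite author's own statement) =====
-- stated objective: alternative
-- what changed: Replaces A's set of growing phrase strings (each step re-builds and re-hashes a string of the current phrase length) by an LZ78 trie encoded as a dict keyed on (node, char) with integer node ids, walking one edge per input character.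
import Mathlib
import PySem

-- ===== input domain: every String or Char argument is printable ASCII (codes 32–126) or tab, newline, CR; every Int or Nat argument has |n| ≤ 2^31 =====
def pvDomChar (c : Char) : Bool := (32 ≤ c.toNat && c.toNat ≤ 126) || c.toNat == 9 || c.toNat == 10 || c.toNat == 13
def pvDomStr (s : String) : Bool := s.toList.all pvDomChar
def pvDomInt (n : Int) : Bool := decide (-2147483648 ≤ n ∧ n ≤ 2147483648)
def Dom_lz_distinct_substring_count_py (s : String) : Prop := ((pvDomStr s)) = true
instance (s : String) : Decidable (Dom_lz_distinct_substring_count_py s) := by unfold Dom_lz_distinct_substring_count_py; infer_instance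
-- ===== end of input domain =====

-- B replaces A's set of growing phrase strings by an LZ78 trie encoded as a dict keyed on
-- (node, char) with integer node ids, walked one edge per character; same count.

-- ===== PORT A =====
-- A's buffer/set of phrases is kept on the List Char side (buf += ch is buf ++ [ch]).
def lzA_step (st : PySem.Set (List Char) × Int × List Char) (ch : Char) :
    PySem.Set (List Char) × Int × List Char :=
  let buf := st.2.2 ++ [ch]
  if buf ∈ st.1 then (st.1, st.2.1, buf)
  else (PySem.Set.add st.1 buf, st.2.1 + 1, [])

def lz_distinct_substring_count_py (s : String) : Int :=
  if s.toList = [] then 0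
  else
    let st := s.toList.foldl lzA_step (PySem.Set.empty, 0, [])
    if st.2.2 ≠ [] then st.2.1 + 1 else st.2.1

-- ===== PORT B =====
-- state: (trie : edges (node, char) ↦ node, cur, nxt, count); root = 0
def lzB_step (st : PySem.Dict (Int × Char) Int × Int × Int × Int) (ch : Char) :
    PySem.Dict (Int × Char) Int × Int × Int × Int :=
  match st.1.get? (st.2.1, ch) with
  | some nid => (st.1, nid, st.2.2.1, st.2.2.2)
  | none => (st.1.insert (st.2.1, ch) st.2.2.1, 0, st.2.2.1 + 1, st.2.2.2 + 1)

def lz_distinct_substring_count_py_alt (s : String) : Int :=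
  let st := s.toList.foldl lzB_step (PySem.Dict.empty, 0, 1, 0)
  if st.2.1 ≠ 0 then st.2.2.2 + 1 else st.2.2.2

-- ===== PRECONDITION & SPEC =====
def Spec_lz_distinct_substring_count_py (s : String) (out : Int) : Prop := out = lz_distinct_substring_count_py_alt s
instance (s : String) (out : Int) : Decidable (Spec_lz_distinct_substring_count_py s out) := by unfold Spec_lz_distinct_substring_count_py; infer_instance

-- ===== CLAIM (what is proved, stated in full; the proofs are below) =====
def Claim_equal_lz_distinct_substring_count_py : Prop := ∀ (s : String), Dom_lz_distinct_substring_count_py s → Spec_lz_distinct_substring_count_py s (lz_distinct_substring_count_py s)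

-- ===== LEMMAS AND PROOFS =====

-- walking the trie from node v along a list of characters
def lzWalk (T : PySem.Dict (Int × Char) Int) (v : Int) : List Char → Option Int
  | [] => some v
  | c :: cs =>
    match T.get? (v, c) with
    | some w => lzWalk T w cs
    | none => none

-- the coupling invariant between A's state (dict, buf) and B's state (T, cur, nxt)
def LZInv (dict : PySem.Set (List Char)) (buf : List Char)
    (T : PySem.Dict (Int × Char) Int) (cur nxt : Int) : Prop :=
  lzWalk T 0 buf = some cur ∧
  (∀ p : List Char, p ∈ dict ↔ (p ≠ [] ∧ (lzWalk T 0 p).isSome)) ∧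
  (∀ p q v, lzWalk T 0 p = some v → lzWalk T 0 q = some v → p = q) ∧
  (∀ k v, T.get? k = some v → (0 ≤ k.1 ∧ k.1 < nxt ∧ 1 ≤ v ∧ v < nxt)) ∧
  1 ≤ nxt

lemma lzWalk_append (T : PySem.Dict (Int × Char) Int) (p : List Char) (c : Char) :
    ∀ v, lzWalk T v (p ++ [c]) =
      match lzWalk T v p with
      | some w => T.get? (w, c)
      | none => none := by
  induction p with
  | nil => intro v; simp only [List.nil_append, lzWalk]; cases T.get? (v, c) <;> rfl
  | cons d ds ih =>
      intro v
      simp only [List.cons_append, lzWalk]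
      cases T.get? (v, d) with
      | some w => exact ih w
      | none => rfl

lemma lzWalk_bound (T : PySem.Dict (Int × Char) Int) (p : List Char) :
    ∀ v0 v, lzWalk T v0 p = some v → v = v0 ∨ ∃ k, T.get? k = some v := by
  induction p with
  | nil => intro v0 v h; simp [lzWalk] at h; left; omega
  | cons c cs ih =>
      intro v0 v h
      simp only [lzWalk] at h
      cases hg : T.get? (v0, c) with
      | none => rw [hg] at h; cases h
      | some w =>
          rw [hg] at h
          rcases ih w v h with h1 | h2
          · right; exact ⟨(v0, c), by rw [hg, h1]⟩
          · right; exact h2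

lemma lzWalk_insert_old (T : PySem.Dict (Int × Char) Int) (cur nxt : Int) (ch : Char)
    (hget : T.get? (cur, ch) = none) (p : List Char) :
    ∀ v0 v, lzWalk T v0 p = some v → lzWalk (T.insert (cur, ch) nxt) v0 p = some v := by
  induction p with
  | nil => intro v0 v h; exact h
  | cons c cs ih =>
      intro v0 v h
      simp only [lzWalk] at h ⊢
      cases hg : T.get? (v0, c) with
      | none => rw [hg] at h; cases h
      | some w =>
          rw [hg] at h
          have hne : (v0, c) ≠ (cur, ch) := by
            intro he; rw [he, hget] at hg; cases hg
          rw [PySem.Dict.get?_insert]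
          rw [if_neg hne, hg]
          exact ih w v h

lemma lzWalk_no_escape (T : PySem.Dict (Int × Char) Int) (cur nxt : Int) (ch : Char)
    (hb : ∀ k v, T.get? k = some v → (0 ≤ k.1 ∧ k.1 < nxt ∧ 1 ≤ v ∧ v < nxt))
    (hcur : cur < nxt) (p : List Char) (v : Int)
    (h : lzWalk (T.insert (cur, ch) nxt) nxt p = some v) : p = [] ∧ v = nxt := by
  cases p with
  | nil => refine ⟨rfl, ?_⟩; simp [lzWalk] at h; omega
  | cons c cs =>
      exfalso
      simp only [lzWalk] at h
      have hne : (nxt, c) ≠ (cur, ch) := by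
        intro he; have := congrArg Prod.fst he; simp at this; omega
      rw [PySem.Dict.get?_insert, if_neg hne] at h
      cases hg : T.get? (nxt, c) with
      | none => rw [hg] at h; cases h
      | some w => have h2 : nxt < nxt := (hb (nxt, c) w hg).2.1; omega

lemma lzWalk_insert_cases (T : PySem.Dict (Int × Char) Int) (cur nxt : Int) (ch : Char)
    (hb : ∀ k v, T.get? k = some v → (0 ≤ k.1 ∧ k.1 < nxt ∧ 1 ≤ v ∧ v < nxt))
    (hcur : cur < nxt) (p : List Char) :
    ∀ v0 v, lzWalk (T.insert (cur, ch) nxt) v0 p = some v →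
      lzWalk T v0 p = some v ∨
      (v = nxt ∧ ∃ q, p = q ++ [ch] ∧ lzWalk T v0 q = some cur) := by
  induction p with
  | nil => intro v0 v h; left; exact h
  | cons c cs ih =>
      intro v0 v h
      simp only [lzWalk] at h
      by_cases he : (v0, c) = (cur, ch)
      · rw [PySem.Dict.get?_insert, if_pos he] at h
        obtain ⟨hnil, hv⟩ := lzWalk_no_escape T cur nxt ch hb hcur cs v h
        right
        refine ⟨hv, [], ?_, ?_⟩
        · simp [hnil]; exact (congrArg Prod.snd he)
        · simp [lzWalk]; exact congrArg Prod.fst he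
      · rw [PySem.Dict.get?_insert, if_neg he] at h
        cases hg : T.get? (v0, c) with
        | none => rw [hg] at h; cases h
        | some w =>
            rw [hg] at h
            rcases ih w v h with h1 | ⟨hv, q, hq, hw⟩
            · left; simp only [lzWalk, hg]; exact h1
            · right
              refine ⟨hv, c :: q, by simp [hq], ?_⟩
              simp only [lzWalk, hg]; exact hw

lemma LZInv_init : LZInv PySem.Set.empty [] PySem.Dict.empty 0 1 := by
  refine ⟨rfl, ?_, ?_, ?_, le_refl 1⟩
  · intro p
    constructor
    · intro hp; cases hp
    · rintro ⟨hne, hs⟩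
      cases p with
      | nil => exact absurd rfl hne
      | cons c cs => simp [lzWalk, PySem.Dict.get?_empty] at hs
  · intro p q v hp hq
    cases p with
    | cons c cs => simp [lzWalk, PySem.Dict.get?_empty] at hp
    | nil =>
      cases q with
      | cons d ds => simp [lzWalk, PySem.Dict.get?_empty] at hq
      | nil => rfl
  · intro k v h; simp [PySem.Dict.get?_empty] at h

lemma LZInv_step (dict : PySem.Set (List Char)) (buf : List Char)
    (T : PySem.Dict (Int × Char) Int) (cur nxt : Int) (ch : Char)
    (hI : LZInv dict buf T cur nxt) :
    ((buf ++ [ch]) ∈ dict ↔ (T.get? (cur, ch)).isSome) ∧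
    (∀ nid, T.get? (cur, ch) = some nid → LZInv dict (buf ++ [ch]) T nid nxt) ∧
    (T.get? (cur, ch) = none →
      LZInv (PySem.Set.add dict (buf ++ [ch])) [] (T.insert (cur, ch) nxt) 0 (nxt + 1)) := by
  obtain ⟨hw, hmem, hinj, hb, hn⟩ := hI
  have hwapp : lzWalk T 0 (buf ++ [ch]) = T.get? (cur, ch) := by
    rw [lzWalk_append T buf ch 0, hw]
  have hcur_bounds : 0 ≤ cur ∧ cur < nxt := by
    rcases lzWalk_bound T buf 0 cur hw with h0 | ⟨k, hk⟩
    · omega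
    · have := hb k cur hk; omega
  have hcur_lt : cur < nxt := hcur_bounds.2
  refine ⟨?_, ?_, ?_⟩
  · rw [hmem (buf ++ [ch])]
    simp only [hwapp]
    constructor
    · rintro ⟨_, h⟩; exact h
    · intro h; exact ⟨by simp, h⟩
  · intro nid hg
    refine ⟨by rw [hwapp, hg], hmem, hinj, hb, hn⟩
  · intro hg
    have hwnew : lzWalk (T.insert (cur, ch) nxt) 0 (buf ++ [ch]) = some nxt := by
      rw [lzWalk_append, lzWalk_insert_old T cur nxt ch hg buf 0 cur hw]
      show (T.insert (cur, ch) nxt).get? (cur, ch) = some nxt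
      rw [PySem.Dict.get?_insert, if_pos rfl]
    have hold : ∀ p v, lzWalk T 0 p = some v → lzWalk (T.insert (cur, ch) nxt) 0 p = some v :=
      fun p v h => lzWalk_insert_old T cur nxt ch hg p 0 v h
    have hcases : ∀ p v, lzWalk (T.insert (cur, ch) nxt) 0 p = some v →
        lzWalk T 0 p = some v ∨ (v = nxt ∧ p = buf ++ [ch]) := by
      intro p v h
      rcases lzWalk_insert_cases T cur nxt ch hb hcur_lt p 0 v h with h1 | ⟨hv, q, hq, hwq⟩
      · left; exact h1
      · right; exact ⟨hv, by rw [hq, hinj q buf cur hwq hw]⟩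
    have hval_lt : ∀ p v, lzWalk T 0 p = some v → v < nxt := by
      intro p v h
      rcases lzWalk_bound T p 0 v h with h0 | ⟨k, hk⟩
      · omega
      · exact (hb k v hk).2.2.2
    refine ⟨rfl, ?_, ?_, ?_, by omega⟩
    · intro p
      rw [PySem.Set.mem_add, hmem p]
      constructor
      · rintro (⟨hne, hs⟩ | hp)
        · refine ⟨hne, ?_⟩
          cases hsv : lzWalk T 0 p with
          | none => rw [hsv] at hs; cases hs
          | some w => rw [hold p w hsv]; rfl
        · subst hp; exact ⟨by simp, by rw [hwnew]; rfl⟩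
      · rintro ⟨hne, hs⟩
        cases hsv : lzWalk (T.insert (cur, ch) nxt) 0 p with
        | none => rw [hsv] at hs; cases hs
        | some w =>
            rcases hcases p w hsv with h1 | ⟨_, hp⟩
            · left; exact ⟨hne, by rw [h1]; rfl⟩
            · right; exact hp
    · intro p q v hp hq
      rcases hcases p v hp with h1 | ⟨hv1, hp1⟩
      · rcases hcases q v hq with h2 | ⟨hv2, hq2⟩
        · exact hinj p q v h1 h2
        · exfalso; have := hval_lt p v h1; omega
      · rcases hcases q v hq with h2 | ⟨hv2, hq2⟩
        · exfalso; have := hval_lt q v h2; omega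
        · rw [hp1, hq2]
    · intro k v h
      rw [PySem.Dict.get?_insert] at h
      by_cases hk : k = (cur, ch)
      · rw [if_pos hk] at h
        have hv : v = nxt := by injection h with h'; omega
        subst hv; subst hk
        exact ⟨by simpa using hcur_bounds.1, by simp; omega, by omega, by omega⟩
      · rw [if_neg hk] at h
        have := hb k v h
        exact ⟨this.1, by omega, this.2.2.1, by omega⟩

lemma lz_loop (cs : List Char) :
    ∀ dict buf T cur nxt count,
    LZInv dict buf T cur nxt →
    (cs.foldl lzA_step (dict, count, buf)).2.1 =
      (cs.foldl lzB_step (T, cur, nxt, count)).2.2.2 ∧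
    ((cs.foldl lzA_step (dict, count, buf)).2.2 = [] ↔
      (cs.foldl lzB_step (T, cur, nxt, count)).2.1 = 0) := by
  induction cs with
  | nil =>
      intro dict buf T cur nxt count hI
      obtain ⟨hw, _, hinj, _, _⟩ := hI
      simp only [List.foldl_nil]
      refine ⟨by trivial, ?_⟩
      constructor
      · intro h; subst h; simp [lzWalk] at hw; omega
      · intro h; subst h
        exact hinj buf [] 0 hw (by rfl)
  | cons c rest ih =>
      intro dict buf T cur nxt count hI
      obtain ⟨hiff, hhit, hmiss⟩ := LZInv_step dict buf T cur nxt c hI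
      simp only [List.foldl_cons]
      cases hg : T.get? (cur, c) with
      | some nid =>
          have hmem : (buf ++ [c]) ∈ dict := hiff.mpr (by rw [hg]; rfl)
          have hA : lzA_step (dict, count, buf) c = (dict, count, buf ++ [c]) := by
            simp [lzA_step, hmem]
          have hB : lzB_step (T, cur, nxt, count) c = (T, nid, nxt, count) := by
            simp [lzB_step, hg]
          rw [hA, hB]
          exact ih dict (buf ++ [c]) T nid nxt count (hhit nid hg)
      | none =>
          have hmem : ¬ (buf ++ [c]) ∈ dict := by
            rw [hiff, hg]; simp
          have hA : lzA_step (dict, count, buf) c =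
              (PySem.Set.add dict (buf ++ [c]), count + 1, []) := by
            simp [lzA_step, hmem]
          have hB : lzB_step (T, cur, nxt, count) c =
              (T.insert (cur, c) nxt, 0, nxt + 1, count + 1) := by
            simp [lzB_step, hg]
          rw [hA, hB]
          exact ih _ [] _ 0 (nxt + 1) (count + 1) (hmiss hg)

-- ===== VERDICT (by name: the statement is the Claim_ definition above) =====
theorem lz_distinct_substring_count_py_spec : Claim_equal_lz_distinct_substring_count_py := by
  intro s _
  unfold Spec_lz_distinct_substring_count_py
  unfold lz_distinct_substring_count_py lz_distinct_substring_count_py_alt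
  by_cases hnil : s.toList = []
  · rw [if_pos hnil, hnil]
    rfl
  · rw [if_neg hnil]
    obtain ⟨hcnt, hbuf⟩ := lz_loop s.toList PySem.Set.empty [] PySem.Dict.empty 0 1 0 LZInv_init
    dsimp only
    split_ifs with h1 h2 h2
    · rw [hcnt]
    · exact absurd (hbuf.mpr (not_not.mp h2)) h1
    · exact absurd (hbuf.mp (not_not.mp h1)) h2
    · exact hcnt
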